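-- pv_equiv track=rewrite | github.com/UMCUGenetics/CNV_Visualisatie | Scripts/Flag_placer.py | sort_flags
-- ===== SOURCE A (Python) =====
-- def sort_flags(flags):
--     """ The sort_flags function sorts the flags on starting position using insertionsort.
--
--     :param flags: a 2d list containing all the flag information.
--     :return flags: a 2d list containing all the flag information.
--     """
--     for i in range(1, len(flags)):
--         key = flags[i][1]
--
--         j = i - 1
--         while j >= 0 and key < flags[j][1] and flags[i][0] == flags[j][0]:
--             temp = flags[j+1]
--             flags[j+1] = flags[j]
--             flags[j] = temp
--             j -= 1
--         flags[j + 1][1] = key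
--
--     return flags
-- ===== SOURCE B (Python) =====
-- def sort_flags(flags):
--     """Group consecutive rows with equal flags[i][0] and stable-sort each run
--     by flags[i][1]; returns a new list (A sorts in place)."""
--     if len(flags) < 2:
--         return flags
--     out = []
--     i = 0
--     n = len(flags)
--     while i < n:
--         j = i + 1
--         while j < n and flags[j][0] == flags[i][0]:
--             j += 1
--         out.extend(sorted(flags[i:j], key=lambda row: row[1]))
--         i = j
--     return out
-- ===== Notes on version B (the rewrite author's own statement) =====
-- stated objective: alternative
-- what changed: Replaces the in-place insertion sort (whose inner scan is confined to the current equal-col0 run) by splitting the list into maximal consecutive equal-col0 runs and stable-sorting each run by col1 with sorted(), concatenating the results.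
import Mathlib
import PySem

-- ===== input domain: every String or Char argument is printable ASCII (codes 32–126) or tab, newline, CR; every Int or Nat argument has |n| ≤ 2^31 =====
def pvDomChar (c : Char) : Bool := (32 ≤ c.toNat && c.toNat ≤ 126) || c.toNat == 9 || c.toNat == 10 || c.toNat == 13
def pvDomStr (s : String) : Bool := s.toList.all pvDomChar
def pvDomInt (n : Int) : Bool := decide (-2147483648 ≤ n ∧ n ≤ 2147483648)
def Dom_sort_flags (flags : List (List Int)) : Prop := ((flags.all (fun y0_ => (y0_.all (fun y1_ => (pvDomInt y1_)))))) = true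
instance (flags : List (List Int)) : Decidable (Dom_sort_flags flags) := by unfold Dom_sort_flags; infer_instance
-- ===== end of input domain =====

-- B replaces A's in-place insertion sort (which scans within equal-col0 runs) by splitting the
-- list into maximal consecutive equal-col0 runs and stable-sorting each run by col1 (alternative).
-- A mutates and returns its argument; B builds a new list: the equivalence is about the return value.

-- ===== PORT A =====
-- inner while loop; second argument is Python's j+1 (0 means j = -1)
def innerA (key : Int) (i : Nat) : Nat → List (List Int) → List (List Int) × Nat
  | 0, xs => (xs, 0)
  | j+1, xs =>
    if key < (xs.getD j []).getD 1 0 ∧ (xs.getD i []).getD 0 0 = (xs.getD j []).getD 0 0 then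
      let temp := xs.getD (j+1) []
      let xs1 := xs.set (j+1) (xs.getD j [])
      let xs2 := xs1.set j temp
      innerA key i j xs2
    else (xs, j+1)

-- one iteration of the outer for loop (body for index i)
def stepA (xs : List (List Int)) (i : Int) : List (List Int) :=
  let key := (xs.getD i.toNat []).getD 1 0
  let r := innerA key i.toNat i.toNat xs
  r.1.set r.2 ((r.1.getD r.2 []).set 1 key)

def sort_flags (flags : List (List Int)) : List (List Int) :=
  (PySem.List.pyRange 1 (flags.length : Int) 1).foldl stepA flags

-- ===== PORT B =====
-- scan forward while col0 is unchanged (inner while of Source B), sort the run, recurse on the rest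
def runsB : List (List Int) → List (List Int)
  | [] => []
  | x :: xs =>
    PySem.List.sorted (x :: xs.takeWhile (fun row => row.getD 0 0 == x.getD 0 0))
        (fun row => row.getD 1 0)
      ++ runsB (xs.dropWhile (fun row => row.getD 0 0 == x.getD 0 0))
termination_by l => l.length
decreasing_by
  have := List.length_dropWhile_le (fun row => row.getD 0 0 == x.getD 0 0) xs
  simpa using Nat.lt_succ_of_le this

def sort_flags_alt (flags : List (List Int)) : List (List Int) :=
  if flags.length < 2 then flags else runsB flags

-- ===== PRECONDITION & SPEC =====
-- Pre_ is exactly A's return domain: with ≥ 2 rows, A reads row[0] and row[1] of every row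
-- and raises IndexError on any row shorter than 2; with ≤ 1 rows A touches nothing.
def Pre_sort_flags (flags : List (List Int)) : Prop :=
  flags.length ≤ 1 ∨ ∀ row ∈ flags, 2 ≤ row.length
instance (flags : List (List Int)) : Decidable (Pre_sort_flags flags) := by
  unfold Pre_sort_flags; infer_instance
def pvWitness_sort_flags : List (List Int) := [[1, 7], [1, 3], [2, 4], [2, 0, 9]]

def Spec_sort_flags (flags : List (List Int)) (out : List (List Int)) : Prop := out = sort_flags_alt flags
instance (flags : List (List Int)) (out : List (List Int)) : Decidable (Spec_sort_flags flags out) := by unfold Spec_sort_flags; infer_instance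

-- ===== CLAIM (what is proved, stated in full; the proofs are below) =====
def Claim_equal_sort_flags : Prop := ∀ (flags : List (List Int)), Dom_sort_flags flags → Pre_sort_flags flags → Spec_sort_flags flags (sort_flags flags)

-- ===== LEMMAS AND PROOFS =====

-- walk condition of A's inner loop, seen from the element r being inserted
def wcb (r x : List Int) : Bool := decide (r.getD 1 0 < x.getD 1 0) && decide (r.getD 0 0 = x.getD 0 0)

-- insert r into acc from the right, walking left while wcb holds (the net effect of A's inner loop)
def ins (acc : List (List Int)) (r : List Int) : List (List Int) :=
  (acc.reverse.dropWhile (wcb r)).reverse ++ r :: (acc.reverse.takeWhile (wcb r)).reverse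

def hd0 (l : List (List Int)) : Int := (l.headD []).getD 0 0
def ls0 (l : List (List Int)) : Int := (l.getLastD []).getD 0 0

theorem getD_append_len (as : List (List Int)) (b : List Int) (cs : List (List Int)) :
    (as ++ b :: cs).getD as.length [] = b := by
  induction as with
  | nil => rfl
  | cons a as ih => simpa using ih

theorem set_append_len (as : List (List Int)) (b v : List Int) (cs : List (List Int)) :
    (as ++ b :: cs).set as.length v = as ++ v :: cs := by
  induction as with
  | nil => rfl
  | cons a as ih => simp [ih]

theorem takeWhile_append_not {α : Type} (p : α → Bool) (u : List α) {b : α} (v : List α)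
    (hb : p b = false) : (u ++ b :: v).takeWhile p = u.takeWhile p := by
  induction u with
  | nil => simp [List.takeWhile, hb]
  | cons a u ih => simp [List.takeWhile]; cases p a <;> simp [ih]

theorem dropWhile_append_not {α : Type} (p : α → Bool) (u : List α) {b : α} (v : List α)
    (hb : p b = false) : (u ++ b :: v).dropWhile p = u.dropWhile p ++ b :: v := by
  induction u with
  | nil => simp [List.dropWhile, hb]
  | cons a u ih => simp [List.dropWhile]; cases p a <;> simp [ih]

theorem takeWhile_append_not_all {α : Type} (p : α → Bool) (u v : List α)
    (hu : u.all p = false) : (u ++ v).takeWhile p = u.takeWhile p := by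
  induction u with
  | nil => simp at hu
  | cons a u ih =>
    simp only [List.all_cons, Bool.and_eq_false_iff] at hu
    rcases hu with hu | hu
    · simp [List.takeWhile, hu]
    · simp [List.takeWhile]; cases h : p a <;> simp [ih hu]

theorem dropWhile_append_not_all {α : Type} (p : α → Bool) (u v : List α)
    (hu : u.all p = false) : (u ++ v).dropWhile p = u.dropWhile p ++ v := by
  induction u with
  | nil => simp at hu
  | cons a u ih =>
    simp only [List.all_cons, Bool.and_eq_false_iff] at hu
    rcases hu with hu | hu
    · simp [List.dropWhile, hu]
    · simp [List.dropWhile]; cases h : p a <;> simp [ih hu]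

-- the element at index pre.length + mid.length of pre ++ r :: mid ++ rest has r's col0
theorem getD_at_block (pre : List (List Int)) (r : List Int) (mid rest : List (List Int))
    (hmid : ∀ m ∈ mid, m.getD 0 0 = r.getD 0 0) :
    ((pre ++ r :: (mid ++ rest)).getD (pre.length + mid.length) []).getD 0 0 = r.getD 0 0 := by
  induction mid using List.reverseRecOn with
  | nil =>
    simp only [List.nil_append, List.length_nil, Nat.add_zero]
    rw [getD_append_len]
  | append_singleton ms m ih =>
    have h2 : (pre ++ r :: ((ms ++ [m]) ++ rest)).getD (pre.length + (ms ++ [m]).length) [] = m := by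
      have e : pre ++ r :: ((ms ++ [m]) ++ rest) = (pre ++ r :: ms) ++ m :: rest := by simp
      have hl : pre.length + (ms ++ [m]).length = (pre ++ r :: ms).length := by simp
      rw [e, hl, getD_append_len]
    rw [h2]
    exact hmid m (by simp)

-- A's inner loop, characterised: it moves r left past the walked elements
theorem innerA_spec (rds : List (List Int)) (r : List Int) :
    ∀ (mid rest : List (List Int)), (∀ m ∈ mid, m.getD 0 0 = r.getD 0 0) →
    innerA (r.getD 1 0) (rds.length + mid.length) rds.length (rds.reverse ++ r :: (mid ++ rest)) =
      ((rds.dropWhile (wcb r)).reverse ++ r :: ((rds.takeWhile (wcb r)).reverse ++ (mid ++ rest)),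
        (rds.dropWhile (wcb r)).length) := by
  induction rds with
  | nil => intro mid rest hmid; simp [innerA]
  | cons x rds' ih =>
    intro mid rest hmid
    have hxlen : (x :: rds').length = rds'.length + 1 := rfl
    have hset : (x :: rds').reverse ++ r :: (mid ++ rest)
        = (rds'.reverse ++ [x]) ++ r :: (mid ++ rest) := by simp
    set xs := (x :: rds').reverse ++ r :: (mid ++ rest) with hxs
    have hj : xs.getD rds'.length [] = x := by
      rw [hset]
      have : (rds'.reverse ++ [x]) ++ r :: (mid ++ rest)
          = rds'.reverse ++ x :: (r :: (mid ++ rest)) := by simp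
      rw [this]
      have hr : rds'.length = rds'.reverse.length := by simp
      rw [hr, getD_append_len]
    have hi : (xs.getD (rds'.length + 1 + mid.length) []).getD 0 0 = r.getD 0 0 := by
      rw [hset]
      have hl : rds'.length + 1 + mid.length = (rds'.reverse ++ [x]).length + mid.length := by
        simp
      rw [hl]
      exact getD_at_block (rds'.reverse ++ [x]) r mid rest hmid
    rw [hxlen, innerA]
    by_cases hw : wcb r x = true
    · have hw1 : r.getD 1 0 < x.getD 1 0 := by
        have := hw; unfold wcb at this; simp at this; exact this.1
      have hw0 : r.getD 0 0 = x.getD 0 0 := by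
        have := hw; unfold wcb at this; simp at this; exact this.2
      rw [if_pos]
      swap
      · exact ⟨by rw [hj]; exact hw1, by rw [hj, hi]; exact hw0⟩
      · -- compute the swap
        have htemp : xs.getD (rds'.length + 1) [] = r := by
          rw [hset]
          have hr : rds'.length + 1 = (rds'.reverse ++ [x]).length := by simp
          rw [hr, getD_append_len]
        have hxs2 : (xs.set (rds'.length + 1) (xs.getD rds'.length [])).set rds'.length
              (xs.getD (rds'.length + 1) [])
            = rds'.reverse ++ r :: ((x :: mid) ++ rest) := by
          have hset1 : xs.set (rds'.length + 1) (xs.getD rds'.length [])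
              = (rds'.reverse ++ [x]) ++ (x :: (mid ++ rest)) := by
            rw [hj, hset]
            have hr : rds'.length + 1 = (rds'.reverse ++ [x]).length := by simp
            rw [hr, set_append_len]
          rw [htemp, hset1]
          have e : (rds'.reverse ++ [x]) ++ (x :: (mid ++ rest))
              = rds'.reverse ++ x :: (x :: (mid ++ rest)) := by simp
          have hr : rds'.length = rds'.reverse.length := by simp
          rw [e, hr, set_append_len]
          simp
        change innerA (r.getD 1 0) (rds'.length + 1 + mid.length) rds'.length
            ((xs.set (rds'.length + 1) (xs.getD rds'.length [])).set rds'.length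
              (xs.getD (rds'.length + 1) [])) = _
        rw [hxs2]
        have hmid' : ∀ m ∈ (x :: mid), m.getD 0 0 = r.getD 0 0 := by
          intro m hm
          rcases List.mem_cons.mp hm with h | h
          · rw [h]; exact hw0.symm
          · exact hmid m h
        have harith : rds'.length + 1 + mid.length = rds'.length + (x :: mid).length := by
          simp; omega
        rw [harith]
        rw [ih (x :: mid) rest hmid']
        have ht : (x :: rds').takeWhile (wcb r) = x :: rds'.takeWhile (wcb r) := by
          simp [List.takeWhile, hw]
        have hd : (x :: rds').dropWhile (wcb r) = rds'.dropWhile (wcb r) := by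
          simp [List.dropWhile, hw]
        rw [ht, hd]
        simp [hxs]
    · rw [if_neg]
      swap
      · intro hc
        apply hw
        have h1 : r.getD 1 0 < x.getD 1 0 := by rw [hj] at hc; exact hc.1
        have h0 : r.getD 0 0 = x.getD 0 0 := by rw [hj, hi] at hc; exact hc.2
        simp only [wcb, Bool.and_eq_true, decide_eq_true_eq]
        exact ⟨h1, h0⟩
      · have hwf : wcb r x = false := by simpa using hw
        have ht : (x :: rds').takeWhile (wcb r) = [] := by
          simp [List.takeWhile, hwf]
        have hd : (x :: rds').dropWhile (wcb r) = x :: rds' := by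
          simp [List.dropWhile, hwf]
        rw [ht, hd]
        simp [hxs]

theorem length_ins (acc : List (List Int)) (r : List Int) : (ins acc r).length = acc.length + 1 := by
  unfold ins
  have hl := congrArg List.length (List.takeWhile_append_dropWhile (p := wcb r) (l := acc.reverse))
  simp only [List.length_append, List.length_reverse, List.length_cons] at hl ⊢
  omega

theorem foldl_ins_length (l acc : List (List Int)) :
    (l.foldl ins acc).length = acc.length + l.length := by
  induction l generalizing acc with
  | nil => simp
  | cons x l ih => simp [List.foldl_cons, ih, length_ins]; omega

theorem set1_getD (r : List Int) (h : 2 ≤ r.length) : r.set 1 (r.getD 1 0) = r := by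
  match r, h with
  | a :: b :: t, _ => rfl

-- outer loop invariant: after the iterations for 1..k-1, the first k rows are run-sorted
theorem outer_inv (flags : List (List Int)) (hrow : ∀ row ∈ flags, 2 ≤ row.length) :
    ∀ k, 1 ≤ k → k ≤ flags.length →
    (PySem.List.pyRange 1 (k : Int) 1).foldl stepA flags =
      (flags.take k).foldl ins [] ++ flags.drop k := by
  intro k
  induction k with
  | zero => omega
  | succ k ih =>
    intro _ hk1
    by_cases hk : 1 ≤ k
    · -- one more outer iteration on top of the invariant for k
      have hkn : k ≤ flags.length := by omega
      have hrange : PySem.List.pyRange 1 ((k + 1 : Nat) : Int) 1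
          = PySem.List.pyRange 1 (k : Int) 1 ++ [(k : Int)] := by
        push_cast
        exact PySem.List.pyRange_one_succ_right (by exact_mod_cast hk)
      rw [hrange, List.foldl_append, ih hk hkn]
      have hklt : k < flags.length := by omega
      set P := (flags.take k).foldl ins [] with hP
      have hPlen : P.length = k := by
        rw [hP, foldl_ins_length]
        simp [hklt.le]
      set r := flags[k] with hr
      have hdrop : flags.drop k = r :: flags.drop (k + 1) :=
        List.drop_eq_getElem_cons hklt
      rw [hdrop]
      simp only [List.foldl_cons, List.foldl_nil]
      -- one application of stepA
      have hkey : ((P ++ r :: flags.drop (k + 1)).getD k []).getD 1 0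
          = r.getD 1 0 := by
        rw [← hPlen, getD_append_len]
      have hinner := innerA_spec P.reverse r [] (flags.drop (k + 1))
        (by intro m hm; simp at hm)
      simp only [List.length_reverse, List.reverse_reverse, List.length_nil, Nat.add_zero,
        List.nil_append] at hinner
      rw [hPlen] at hinner
      unfold stepA
      simp only [Int.toNat_natCast, hkey, hinner]
      set D := List.dropWhile (wcb r) P.reverse with hD
      set T := List.takeWhile (wcb r) P.reverse with hT
      have hDlen : D.length = D.reverse.length := by simp
      have hgd : (D.reverse ++ r :: (T.reverse ++ flags.drop (k + 1))).getD D.length [] = r := by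
        rw [hDlen, getD_append_len]
      have hr2 : 2 ≤ r.length := hrow r (by rw [hr]; exact List.getElem_mem hklt)
      rw [hgd, set1_getD r hr2, hDlen, set_append_len]
      -- now identify with ins P r and the take (k+1) fold
      have htake : flags.take (k + 1) = flags.take k ++ [r] := by
        rw [hr, List.take_succ]
        simp [hklt]
      rw [htake, List.foldl_append]
      simp only [List.foldl_cons, List.foldl_nil, ← hP]
      unfold ins
      rw [← hD, ← hT]
      simp
    · -- k = 0 : the range for k+1 = 1 is empty and take 1/drop 1 split off the head
      have hk0 : k = 0 := by omega
      subst hk0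
      have h1 : flags.length ≥ 1 := by omega
      have hrange : PySem.List.pyRange 1 ((1 : Nat) : Int) 1 = [] := by decide
      rw [hrange]
      cases flags with
      | nil => simp at h1
      | cons f rest =>
        simp [List.foldl_nil, ins]

theorem ins_ne_nil (acc : List (List Int)) (r : List Int) : ins acc r ≠ [] := by
  unfold ins; simp

theorem headD_append_of_ne_nil {α : Type} (u v : List α) (d : α) (h : u ≠ []) :
    (u ++ v).headD d = u.headD d := by
  cases u with
  | nil => exact absurd rfl h
  | cons a u => rfl

theorem headD_mem {α : Type} (l : List α) (d : α) (h : l ≠ []) : l.headD d ∈ l := by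
  cases l with
  | nil => exact absurd rfl h
  | cons a t => simp

theorem getLastD_mem {α : Type} (l : List α) (d : α) (h : l ≠ []) : l.getLastD d ∈ l := by
  induction l with
  | nil => exact absurd rfl h
  | cons a l ih =>
    cases l with
    | nil => simp
    | cons b t => simpa using Or.inr (ih (by simp))

-- inserting preserves the head's col0
theorem hd0_ins (cs : List (List Int)) (r : List Int) (h : cs ≠ []) : hd0 (ins cs r) = hd0 cs := by
  unfold ins
  cases hD : cs.reverse.dropWhile (wcb r) with
  | nil =>
    have hT : cs.reverse.takeWhile (wcb r) = cs.reverse := by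
      rw [List.takeWhile_eq_self_iff]
      intro x hx
      exact List.dropWhile_eq_nil_iff.mp hD x hx
    rw [hT]
    simp only [List.reverse_nil, List.nil_append, List.reverse_reverse]
    have hh : wcb r (cs.headD []) = true :=
      List.dropWhile_eq_nil_iff.mp hD (cs.headD []) (by simpa using headD_mem cs [] h)
    have : r.getD 0 0 = (cs.headD []).getD 0 0 := by
      simpa [wcb] using (Bool.and_eq_true_iff.mp hh).2
    simpa [hd0] using this
  | cons d D2 =>
    have hsplit : cs = (cs.reverse.dropWhile (wcb r)).reverse
        ++ (cs.reverse.takeWhile (wcb r)).reverse := by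
      conv_lhs => rw [← List.reverse_reverse cs,
        ← List.takeWhile_append_dropWhile (p := wcb r) (l := cs.reverse)]
      rw [List.reverse_append]
    unfold hd0
    rw [headD_append_of_ne_nil _ _ _ (by simp)]
    conv_rhs => rw [hsplit, hD]
    rw [headD_append_of_ne_nil _ _ _ (by simp)]

theorem ins_last_ne (acc : List (List Int)) (b : List Int) (hacc : acc ≠ [])
    (h : wcb b (acc.getLastD []) = false) : ins acc b = acc ++ [b] := by
  induction acc using List.reverseRecOn with
  | nil => exact absurd rfl hacc
  | append_singleton as a _ =>
    rw [List.getLastD_concat] at h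
    unfold ins
    rw [List.reverse_append]
    simp only [List.reverse_cons, List.reverse_nil, List.nil_append, List.singleton_append]
    rw [List.takeWhile_cons_of_neg (by simp [h]), List.dropWhile_cons_of_neg (by simp [h])]
    simp

theorem ins_append_split (as cs : List (List Int)) (r : List Int) (hcs : cs ≠ [])
    (h : ls0 as ≠ hd0 cs ∨ as = []) : ins (as ++ cs) r = as ++ ins cs r := by
  rcases h with h | h
  · by_cases hall : cs.reverse.all (wcb r)
    · -- every element of cs is walked past; the boundary element of as stops the walk
      have hhd : wcb r (cs.headD []) = true := by
        have : cs.headD [] ∈ cs.reverse := by simpa using headD_mem cs [] hcs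
        exact (List.all_eq_true.mp hall) _ this
      have hr0 : r.getD 0 0 = hd0 cs := by
        simpa [wcb, hd0] using (Bool.and_eq_true_iff.mp hhd).2
      induction as using List.reverseRecOn with
      | nil => simp
      | append_singleton as' a _ =>
        have hla : wcb r a = false := by
          by_contra hx
          have hx' : wcb r a = true := by simpa using hx
          have : r.getD 0 0 = a.getD 0 0 := by
            simpa [wcb] using (Bool.and_eq_true_iff.mp hx').2
          apply h
          rw [ls0, List.getLastD_concat, ← this, hr0]
        unfold ins
        rw [List.reverse_append, List.reverse_append]
        simp only [List.reverse_cons, List.reverse_nil, List.nil_append, List.singleton_append]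
        rw [takeWhile_append_not (wcb r) cs.reverse as'.reverse hla,
          dropWhile_append_not (wcb r) cs.reverse as'.reverse hla]
        simp
    · have hall' : cs.reverse.all (wcb r) = false := by simpa using hall
      unfold ins
      rw [List.reverse_append]
      rw [takeWhile_append_not_all (wcb r) cs.reverse as.reverse hall',
        dropWhile_append_not_all (wcb r) cs.reverse as.reverse hall']
      simp
  · subst h; simp

theorem fold_shift (bs : List (List Int)) : ∀ (as cs : List (List Int)), cs ≠ [] →
    ls0 as ≠ hd0 cs →
    bs.foldl ins (as ++ cs) = as ++ bs.foldl ins cs := by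
  induction bs with
  | nil => intro as cs _ _; rfl
  | cons b bs ih =>
    intro as cs hcs h
    simp only [List.foldl_cons]
    rw [ins_append_split as cs b hcs (Or.inl h)]
    exact ih as (ins cs b) (ins_ne_nil cs b) (by rw [hd0_ins cs b hcs]; exact h)

-- folding ins over a block of rows that share col0 is Python's stable sort of the block
theorem ins_eq_insertBy (r : List Int) : ∀ (acc : List (List Int)),
    acc.Pairwise (fun a b => a.getD 1 0 ≤ b.getD 1 0) →
    (∀ x ∈ acc, x.getD 0 0 = r.getD 0 0) →
    ins acc r = PySem.List.insertBy (fun a b => decide (a.getD 1 0 < b.getD 1 0)) r acc := by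
  intro acc
  induction acc with
  | nil => intro _ _; simp [ins]; rfl
  | cons x cs ih =>
    intro hpair hcol
    have hx0 : x.getD 0 0 = r.getD 0 0 := hcol x (by simp)
    have heq : PySem.List.insertBy (fun a b => decide (a.getD 1 0 < b.getD 1 0)) r (x :: cs)
        = if decide (r.getD 1 0 < x.getD 1 0) then r :: x :: cs
          else x :: PySem.List.insertBy (fun a b => decide (a.getD 1 0 < b.getD 1 0)) r cs := rfl
    by_cases hlt : r.getD 1 0 < x.getD 1 0
    · have hwall : ∀ y ∈ (x :: cs : List (List Int)), wcb r y = true := by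
        intro y hy
        have hy1 : x.getD 1 0 ≤ y.getD 1 0 := by
          rcases List.mem_cons.mp hy with h | h
          · rw [h]
          · exact (List.pairwise_cons.mp hpair).1 y h
        have hy0 : y.getD 0 0 = r.getD 0 0 := hcol y hy
        unfold wcb
        rw [Bool.and_eq_true_iff]
        refine ⟨decide_eq_true ?_, decide_eq_true hy0.symm⟩
        omega
      unfold ins
      rw [List.takeWhile_eq_self_iff.mpr
        (by intro y hy; exact hwall y (List.mem_reverse.mp hy))]
      rw [List.dropWhile_eq_nil_iff.mpr
        (by intro y hy; exact hwall y (List.mem_reverse.mp hy))]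
      rw [heq, if_pos (by simpa using hlt)]
      simp
    · have hwx : wcb r x = false := by
        unfold wcb
        rw [Bool.and_eq_false_iff]
        exact Or.inl (decide_eq_false hlt)
      unfold ins
      rw [List.reverse_cons]
      rw [takeWhile_append_not (wcb r) cs.reverse [] hwx,
        dropWhile_append_not (wcb r) cs.reverse [] hwx]
      rw [heq, if_neg (by simpa using hlt)]
      rw [← ih (List.pairwise_cons.mp hpair).2 (fun y hy => hcol y (List.mem_cons_of_mem x hy))]
      unfold ins
      simp

theorem block_fold_sorted (block : List (List Int)) (c : Int)
    (hc : ∀ x ∈ block, x.getD 0 0 = c) :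
    block.foldl ins [] = PySem.List.sorted block (fun row => row.getD 1 0) := by
  induction block using List.reverseRecOn with
  | nil => rfl
  | append_singleton bs r ih =>
    have hbs : ∀ x ∈ bs, x.getD 0 0 = c := fun x hx => hc x (by simp [hx])
    have hr : r.getD 0 0 = c := hc r (by simp)
    rw [List.foldl_append, List.foldl_cons, List.foldl_nil, ih hbs]
    rw [ins_eq_insertBy r (PySem.List.sorted bs (fun row => row.getD 1 0))
      (PySem.List.sorted_pairwise bs (fun row => row.getD 1 0))
      (by
        intro x hx
        rw [hbs x ((PySem.List.mem_sorted bs (fun row => row.getD 1 0) false x).mp hx), hr])]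
    rw [PySem.List.sorted_eq_foldl_insertBy (bs ++ [r]) (fun row => row.getD 1 0),
      List.foldl_append, List.foldl_cons, List.foldl_nil,
      ← PySem.List.sorted_eq_foldl_insertBy bs (fun row => row.getD 1 0)]

theorem dropWhile_head_false {α : Type} (p : α → Bool) (l : List α) {b : α} {t : List α}
    (h : l.dropWhile p = b :: t) : p b = false := by
  induction l generalizing t with
  | nil => simp at h
  | cons a l ih =>
    by_cases hp : p a
    · rw [List.dropWhile_cons_of_pos hp] at h
      exact ih h
    · rw [List.dropWhile_cons_of_neg hp] at h
      cases h
      simpa using hp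

theorem runsB_eq : ∀ (n : Nat) (l : List (List Int)), l.length ≤ n → runsB l = l.foldl ins [] := by
  intro n
  induction n with
  | zero =>
    intro l hl
    have : l = [] := List.eq_nil_of_length_eq_zero (by omega)
    subst this
    rw [runsB]
    rfl
  | succ n ih =>
    intro l hl
    cases l with
    | nil => rw [runsB]; rfl
    | cons x xs =>
      rw [runsB]
      have hxs : xs = xs.takeWhile (fun row => row.getD 0 0 == x.getD 0 0)
          ++ xs.dropWhile (fun row => row.getD 0 0 == x.getD 0 0) :=
        (List.takeWhile_append_dropWhile).symm
      have hblock : ∀ y ∈ x :: xs.takeWhile (fun row => row.getD 0 0 == x.getD 0 0),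
          y.getD 0 0 = x.getD 0 0 := by
        intro y hy
        rcases List.mem_cons.mp hy with h | h
        · rw [h]
        · exact eq_of_beq
            (List.mem_takeWhile_imp (p := fun row : List Int => row.getD 0 0 == x.getD 0 0) h)
      have hS := block_fold_sorted
        (x :: xs.takeWhile (fun row => row.getD 0 0 == x.getD 0 0)) (x.getD 0 0) hblock
      have hfold : (x :: xs).foldl ins []
          = (xs.dropWhile (fun row => row.getD 0 0 == x.getD 0 0)).foldl ins
            (PySem.List.sorted (x :: xs.takeWhile (fun row => row.getD 0 0 == x.getD 0 0))
              (fun row => row.getD 1 0)) := by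
        conv_lhs => rw [show x :: xs
          = (x :: xs.takeWhile (fun row => row.getD 0 0 == x.getD 0 0))
            ++ xs.dropWhile (fun row => row.getD 0 0 == x.getD 0 0) from by
              rw [List.cons_append, ← hxs]]
        rw [List.foldl_append, hS]
      rw [hfold]
      set S := PySem.List.sorted (x :: xs.takeWhile (fun row => row.getD 0 0 == x.getD 0 0))
        (fun row => row.getD 1 0) with hSdef
      cases hrest : xs.dropWhile (fun row => row.getD 0 0 == x.getD 0 0) with
      | nil => rw [runsB]; simp
      | cons b rest' =>
        have hb : (fun row : List Int => row.getD 0 0 == x.getD 0 0) b = false :=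
          dropWhile_head_false _ xs hrest
        have hb0 : ¬ b.getD 0 0 = x.getD 0 0 := by simpa using hb
        have hSne : S ≠ [] := by
          rw [hSdef]
          rw [Ne, PySem.List.sorted_eq_nil_iff]
          simp
        have hlsS : ls0 S = x.getD 0 0 := by
          unfold ls0
          apply hblock
          rw [← PySem.List.mem_sorted
            (x :: xs.takeWhile (fun row => row.getD 0 0 == x.getD 0 0))
            (fun row => row.getD 1 0) false]
          exact getLastD_mem S [] hSne
        have hwcb : wcb b (S.getLastD []) = false := by
          unfold wcb
          rw [Bool.and_eq_false_iff]
          right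
          apply decide_eq_false
          rw [show (S.getLastD []).getD 0 0 = ls0 S from rfl, hlsS]
          exact hb0
        rw [List.foldl_cons, ins_last_ne S b hSne hwcb]
        rw [fold_shift rest' S [b] (by simp)
          (by rw [hlsS]; unfold hd0; simpa using fun h => hb0 h.symm)]
        have hrlen : (b :: rest').length ≤ n := by
          rw [← hrest]
          have := List.length_dropWhile_le (fun row : List Int => row.getD 0 0 == x.getD 0 0) xs
          simp at hl
          omega
        rw [ih (b :: rest') hrlen]
        simp only [List.foldl_cons]
        rfl

theorem sort_flags_spec : Claim_equal_sort_flags := by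
  intro flags _ hpre
  unfold Spec_sort_flags sort_flags_alt
  by_cases hlen : flags.length < 2
  · rw [if_pos hlen]
    match flags, hlen with
    | [], _ => rfl
    | [f], _ =>
      show sort_flags [f] = [f]
      unfold sort_flags
      have h1 : ((([f] : List (List Int)).length : Nat) : Int) = 1 := by simp
      have h0 : PySem.List.pyRange 1 (1 : Int) 1 = [] := by decide
      rw [h1, h0]
      rfl
    | f :: g :: t, h => simp at h
  · rw [if_neg hlen]
    have h2 : 2 ≤ flags.length := by omega
    have hrow : ∀ row ∈ flags, 2 ≤ row.length := by
      rcases hpre with h | h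
      · omega
      · exact h
    rw [runsB_eq flags.length flags (le_refl _)]
    unfold sort_flags
    rw [outer_inv flags hrow flags.length (by omega) (le_refl _)]
    simp
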